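-- pv_equiv track=rewrite | github.com/volcengine/verl | atropos/environments/intern_bootcamp/internbootcamp_lib/internbootcamp/libs/masyu/masyu_solver.py | check_valid_masyu
-- ===== SOURCE A (Python) =====
-- def check_valid_masyu(grid):
--     """
--     检查Masyu谜题是否有效
--
--     参数:
--         grid: 谜题网格
--
--     返回:
--         is_valid: 谜题是否有效
--     """
--     # 简化的验证逻辑，主要检查珠子的位置是否合理
--     rows = len(grid)
--     cols = len(grid[0]) if rows > 0 else 0
--
--     # 检查网格大小
--     if rows < 4 or cols < 4:
--         return False
--
--     # 计算珠子数量
--     black_pearls = sum(row.count('B') for row in grid)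
--     white_pearls = sum(row.count('W') for row in grid)
--
--     # 检查珠子数量是否合理
--     if black_pearls == 0 and white_pearls == 0:
--         return False
--
--     # 检查珠子是否有足够的空间
--     for r in range(rows):
--         for c in range(cols):
--             if grid[r][c] == 'B':
--                 # 黑珠需要有足够的空间来满足规则
--                 # 检查是否有至少两个方向可以直行
--                 valid_directions = 0
--
--                 # 检查上方
--                 if r >= 2:
--                     valid_directions += 1
--
--                 # 检查下方
--                 if r <= rows - 3:
--                     valid_directions += 1
--
--                 # 检查左方
--                 if c >= 2:
--                     valid_directions += 1
--
--                 # 检查右方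
--                 if c <= cols - 3:
--                     valid_directions += 1
--
--                 # 黑珠至少需要两个有效方向
--                 if valid_directions < 2:
--                     return False
--
--             elif grid[r][c] == 'W':
--                 # 白珠需要有足够的空间来满足规则
--                 # 检查是否有至少一个方向可以直行并拐弯
--                 valid_directions = 0
--
--                 # 检查水平方向
--                 if c >= 1 and c <= cols - 2:
--                     valid_directions += 1
--
--                 # 检查垂直方向
--                 if r >= 1 and r <= rows - 2:
--                     valid_directions += 1
--
--                 # 白珠至少需要一个有效方向
--                 if valid_directions < 1:
--                     return False
--
--     # 通过所有检查，谜题有效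
--     return True
-- ===== SOURCE B (Python) =====
-- def check_valid_masyu(grid):
--     rows = len(grid)
--     cols = len(grid[0]) if rows > 0 else 0
--     if rows < 4 or cols < 4:
--         return False
--     # A black pearl always has >= 2 open directions once rows,cols >= 4, and a white
--     # pearl fails only at the four grid corners; so validation reduces to a corner test.
--     if any(grid[r][c] == 'W' for r in (0, rows - 1) for c in (0, cols - 1)):
--         return False
--     return any(cell in ('B', 'W') for row in grid for cell in row)
-- ===== Notes on version B (the rewrite author's own statement) =====
-- stated objective: simpler
-- what changed: Replaced A's O(rows*cols) per-cell direction validation by a closed-form test: once rows>=4 and cols>=4 every black pearl has >=2 open directions and a white pearl fails only at the four grid corners, so B just checks the four corner cells for 'W' and then scans for pearl existence.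
import Mathlib
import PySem

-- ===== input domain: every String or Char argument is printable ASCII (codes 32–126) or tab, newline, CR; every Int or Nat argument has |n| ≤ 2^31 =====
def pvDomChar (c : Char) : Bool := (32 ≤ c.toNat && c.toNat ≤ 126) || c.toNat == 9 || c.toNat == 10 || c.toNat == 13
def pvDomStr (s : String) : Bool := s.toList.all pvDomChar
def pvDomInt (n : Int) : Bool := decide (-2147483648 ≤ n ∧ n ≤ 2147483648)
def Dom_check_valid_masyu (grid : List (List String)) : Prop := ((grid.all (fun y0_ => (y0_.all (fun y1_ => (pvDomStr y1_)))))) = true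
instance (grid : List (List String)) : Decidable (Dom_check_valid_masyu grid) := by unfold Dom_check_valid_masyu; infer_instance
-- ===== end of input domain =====

-- B replaces A's per-cell direction validation by a closed-form corner test (on a grid of
-- validated size, only a white pearl at one of the four corners can fail A's checks) plus
-- a pearl-existence scan; objective: simpler.

-- ===== PORT A =====
-- per-cell validation of A's nested loop body (early `return False` ≡ `all`)
def pvAcell (rows cols r c : Nat) (cell : String) : Bool :=
  if cell = "B" then
    decide (2 ≤ (if 2 ≤ r then 1 else 0) + (if r ≤ rows - 3 then 1 else 0)
      + (if 2 ≤ c then 1 else 0) + (if c ≤ cols - 3 then (1 : Nat) else 0))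
  else if cell = "W" then
    decide (1 ≤ (if 1 ≤ c ∧ c ≤ cols - 2 then 1 else 0)
      + (if 1 ≤ r ∧ r ≤ rows - 2 then (1 : Nat) else 0))
  else true

def check_valid_masyu (grid : List (List String)) : Bool :=
  let rows : Nat := grid.length
  let cols : Nat := if 0 < rows then grid.headI.length else 0
  if rows < 4 ∨ cols < 4 then false
  else
    let black : Nat := (grid.map (fun row => row.count "B")).sum
    let white : Nat := (grid.map (fun row => row.count "W")).sum
    if black = 0 ∧ white = 0 then false
    else
      (List.range rows).all (fun r => (List.range cols).all (fun c =>
        pvAcell rows cols r c ((grid.getD r []).getD c "")))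

-- ===== PORT B =====
def check_valid_masyu_alt (grid : List (List String)) : Bool :=
  let rows : Nat := grid.length
  let cols : Nat := if 0 < rows then grid.headI.length else 0
  if rows < 4 ∨ cols < 4 then false
  else if [0, rows - 1].any (fun r => [0, cols - 1].any (fun c =>
      (grid.getD r []).getD c "" = "W")) then false
  else grid.any (fun row => row.any (fun cell => cell = "B" ∨ cell = "W"))

-- ===== PRECONDITION & SPEC =====
-- Pre_ excludes grids of validated size (rows ≥ 4 and first-row length ≥ 4) that contain a
-- row shorter than the first row: there A's cell indexing grid[r][c] over range(cols) can
-- raise IndexError (and when an early `return False` happens first, B's value still agrees,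
-- so such excluded inputs are cited).
def Pre_check_valid_masyu (grid : List (List String)) : Prop :=
  grid.length < 4 ∨ grid.headI.length < 4 ∨ ∀ row ∈ grid, grid.headI.length ≤ row.length
instance (grid : List (List String)) : Decidable (Pre_check_valid_masyu grid) := by
  unfold Pre_check_valid_masyu; infer_instance

def pvWitness_check_valid_masyu : List (List String) :=
  [["", "", "", ""], ["", "W", "", ""], ["", "", "", ""], ["", "", "", ""]]

def Spec_check_valid_masyu (grid : List (List String)) (out : Bool) : Prop := out = check_valid_masyu_alt grid
instance (grid : List (List String)) (out : Bool) : Decidable (Spec_check_valid_masyu grid out) := by unfold Spec_check_valid_masyu; infer_instance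

-- ===== CLAIM (what is proved, stated in full; the proofs are below) =====
def Claim_equal_check_valid_masyu : Prop := ∀ (grid : List (List String)), Dom_check_valid_masyu grid → Pre_check_valid_masyu grid → Spec_check_valid_masyu grid (check_valid_masyu grid)

-- ===== LEMMAS AND PROOFS =====

-- on a grid of validated size, A's per-cell check fails exactly at a white corner
theorem pvAcell_eq_corner (rows cols r c : Nat) (cell : String)
    (hr : r < rows) (hc : c < cols) (hrows : 4 ≤ rows) (hcols : 4 ≤ cols) :
    pvAcell rows cols r c cell
      = !(decide (cell = "W") &&
          decide ((r = 0 ∨ r = rows - 1) ∧ (c = 0 ∨ c = cols - 1))) := by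
  unfold pvAcell
  by_cases hB : cell = "B" <;> by_cases hW : cell = "W" <;>
    simp_all <;> split_ifs <;> simp_all <;> omega

-- a pearl-existence scan sees exactly "count sums are positive"
theorem pvRowPearl (row : List String) :
    (row.any (fun cell => cell = "B" ∨ cell = "W"))
      = decide (0 < row.count "B" + row.count "W") := by
  induction row with
  | nil => simp
  | cons a l ih =>
    simp only [List.any_cons, List.count_cons, ih]
    by_cases hB : a = "B" <;> by_cases hW : a = "W" <;>
      simp [hB, hW]

theorem pvGridPearl (grid : List (List String)) :
    (grid.any (fun row => row.any (fun cell => cell = "B" ∨ cell = "W")))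
      = decide (0 < (grid.map (fun row => row.count "B")).sum
          + (grid.map (fun row => row.count "W")).sum) := by
  induction grid with
  | nil => simp
  | cons row g ih =>
    rw [List.any_cons, ih, pvRowPearl, ← Bool.decide_or, decide_eq_decide,
      List.map_cons, List.map_cons, List.sum_cons, List.sum_cons]
    omega

-- if the "W" count sum is zero, no getD-read cell is "W"
theorem pvNoW (grid : List (List String))
    (h : (grid.map (fun row => row.count "W")).sum = 0) (r c : Nat) (hr : r < grid.length) :
    (grid.getD r []).getD c "" ≠ "W" := by
  have hrow : grid.getD r [] ∈ grid := by
    rw [List.getD_eq_getElem grid [] hr]; exact List.getElem_mem hr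
  have hcount : (grid.getD r []).count "W" = 0 := by
    have := List.sum_eq_zero_iff.mp h
    exact this _ (List.mem_map_of_mem hrow)
  by_cases hcl : c < (grid.getD r []).length
  · rw [List.getD_eq_getElem _ "" hcl]
    intro hW
    have : "W" ∈ grid.getD r [] := hW ▸ List.getElem_mem hcl
    simp [List.count_eq_zero] at hcount
    exact hcount this
  · rw [List.getD_eq_default _ "" (by omega)]
    decide

-- ===== VERDICT (by name: the statement is the Claim_ definition above) =====
theorem check_valid_masyu_spec : Claim_equal_check_valid_masyu := by
  intro grid _ _
  unfold Spec_check_valid_masyu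
  simp only [check_valid_masyu, check_valid_masyu_alt]
  by_cases hr4 : grid.length < 4
  · rw [if_pos (Or.inl hr4), if_pos (Or.inl hr4)]
  · have h0 : 0 < grid.length := by omega
    rw [if_pos h0]
    by_cases hc4 : grid.headI.length < 4
    · rw [if_pos (Or.inr hc4), if_pos (Or.inr hc4)]
    · have hcond : ¬(grid.length < 4 ∨ grid.headI.length < 4) := not_or.mpr ⟨hr4, hc4⟩
      rw [if_neg hcond, if_neg hcond]
      set rows := grid.length with hrows
      set cols := grid.headI.length with hcols
      have hrows4 : 4 ≤ rows := by omega
      have hcols4 : 4 ≤ cols := by omega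
      -- A's nested `all` ↔ no white corner
      have hall : ((List.range rows).all (fun r => (List.range cols).all (fun c =>
            pvAcell rows cols r c ((grid.getD r []).getD c ""))))
          = !([0, rows - 1].any (fun r => [0, cols - 1].any (fun c =>
              (grid.getD r []).getD c "" = "W"))) := by
        rcases Bool.eq_false_or_eq_true ([0, rows - 1].any (fun r => [0, cols - 1].any (fun c =>
            (grid.getD r []).getD c "" = "W"))) with hany | hany
        · rw [hany, Bool.not_true]
          simp only [List.any_cons, List.any_nil, Bool.or_false, Bool.or_eq_true] at hany
          have hex : ∃ r c, r < rows ∧ c < cols ∧ (r = 0 ∨ r = rows - 1)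
              ∧ (c = 0 ∨ c = cols - 1) ∧ (grid.getD r []).getD c "" = "W" := by
            rcases hany with (h | h) | (h | h) <;> rw [decide_eq_true_iff] at h
            · exact ⟨0, 0, by omega, by omega, Or.inl rfl, Or.inl rfl, h⟩
            · exact ⟨0, cols - 1, by omega, by omega, Or.inl rfl, Or.inr rfl, h⟩
            · exact ⟨rows - 1, 0, by omega, by omega, Or.inr rfl, Or.inl rfl, h⟩
            · exact ⟨rows - 1, cols - 1, by omega, by omega, Or.inr rfl, Or.inr rfl, h⟩
          rcases hex with ⟨r, c, hr, hc, hrc, hcc, hW⟩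
          rw [Bool.eq_false_iff]
          intro hcontra
          rw [List.all_eq_true] at hcontra
          have := hcontra r (List.mem_range.mpr hr)
          rw [List.all_eq_true] at this
          have := this c (List.mem_range.mpr hc)
          rw [pvAcell_eq_corner rows cols r c _ hr hc hrows4 hcols4] at this
          rw [Bool.not_eq_true', Bool.and_eq_false_iff] at this
          rcases this with h | h
          · rw [hW] at h
            simp at h
          · rw [decide_eq_false_iff_not] at h
            exact h ⟨hrc, hcc⟩
        · rw [hany, Bool.not_false]
          rw [List.all_eq_true]
          intro r hrmem
          rw [List.all_eq_true]
          intro c hcmem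
          rw [List.mem_range] at hrmem hcmem
          rw [pvAcell_eq_corner rows cols r c _ hrmem hcmem hrows4 hcols4]
          simp only [List.any_cons, List.any_nil, Bool.or_false] at hany
          by_cases hcorner : (r = 0 ∨ r = rows - 1) ∧ (c = 0 ∨ c = cols - 1)
          · have hnW : ¬((grid.getD r []).getD c "" = "W") := by
              intro hW
              rcases hcorner with ⟨hrc, hcc⟩
              rcases hrc with rfl | rfl <;> rcases hcc with rfl | rfl <;>
                (simp only [List.getD_eq_getElem?_getD] at hW; simp [hW] at hany)
            rw [Bool.not_eq_true', Bool.and_eq_false_iff]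
            exact Or.inl (decide_eq_false hnW)
          · rw [Bool.not_eq_true', Bool.and_eq_false_iff]
            exact Or.inr (decide_eq_false hcorner)
      by_cases hz : (grid.map (fun row => row.count "B")).sum = 0
          ∧ (grid.map (fun row => row.count "W")).sum = 0
      · rw [if_pos hz]
        have hnc : ([0, rows - 1].any (fun r => [0, cols - 1].any (fun c =>
            (grid.getD r []).getD c "" = "W"))) = false := by
          rw [List.any_eq_false]
          intro r hrmem
          simp only [Bool.not_eq_true]
          rw [List.any_eq_false]
          intro c hcmem
          simp only [List.mem_cons, List.not_mem_nil, or_false] at hrmem hcmem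
          rcases hrmem with rfl | rfl <;> rcases hcmem with rfl | rfl <;>
            simpa using pvNoW grid hz.2 _ _ (by omega)
        rw [if_neg (by rw [hnc]; decide)]
        rw [pvGridPearl, hz.1, hz.2]
        decide
      · rw [if_neg hz]
        rw [hall]
        have hpos : 0 < (grid.map (fun row => row.count "B")).sum
            + (grid.map (fun row => row.count "W")).sum := by
          rcases Nat.eq_zero_or_pos ((grid.map (fun row => row.count "B")).sum) with h | h <;>
          rcases Nat.eq_zero_or_pos ((grid.map (fun row => row.count "W")).sum) with h' | h' <;>
            first
            | (exfalso; exact hz ⟨h, h'⟩)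
            | omega
        rcases Bool.eq_false_or_eq_true ([0, rows - 1].any (fun r => [0, cols - 1].any (fun c =>
            (grid.getD r []).getD c "" = "W"))) with hany | hany
        · rw [hany, if_pos rfl]
          decide
        · rw [hany, if_neg (by decide)]
          rw [pvGridPearl]
          simp [hpos]
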